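-- pv_equiv track=rewrite | github.com/lsh23/algorithm-exercise | 이분탐색/휴게소세우기.py | put_rest_area
-- ===== SOURCE A (Python) =====
-- def put_rest_area(n: int, m: int, l: int, rest_area: list[int], min_dist: int) -> bool:
--     put_cnt: int = 0
--
--     prev: int = 0
--     for area in rest_area:
--         while area > prev + min_dist:
--             prev = prev + min_dist
--             put_cnt += 1
--         prev = area
--
--     while l - 1 >= prev + min_dist:
--         prev = prev + min_dist
--         put_cnt += 1
--
--     return put_cnt <= m
-- ===== SOURCE B (Python) =====
-- def put_rest_area(n: int, m: int, l: int, rest_area: list[int], min_dist: int) -> bool: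
--     cnt = 0
--     prev = 0
--     for area in rest_area:
--         if area > prev:
--             cnt += (area - prev - 1) // min_dist
--         prev = area
--     if l - 1 >= prev:
--         cnt += (l - 1 - prev) // min_dist
--     return cnt <= m
-- ===== Notes on version B (the rewrite author's own statement) =====
-- stated objective: faster
-- what changed: Replaced A's unit-step while loops (stepping prev by min_dist and counting one area per iteration) with a single floor division per gap that computes the number of placed areas directly.
-- outside the precondition, e.g. on put_rest_area(0, 0, 0, [], 0): A returns True, B returns True
import Mathlib
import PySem

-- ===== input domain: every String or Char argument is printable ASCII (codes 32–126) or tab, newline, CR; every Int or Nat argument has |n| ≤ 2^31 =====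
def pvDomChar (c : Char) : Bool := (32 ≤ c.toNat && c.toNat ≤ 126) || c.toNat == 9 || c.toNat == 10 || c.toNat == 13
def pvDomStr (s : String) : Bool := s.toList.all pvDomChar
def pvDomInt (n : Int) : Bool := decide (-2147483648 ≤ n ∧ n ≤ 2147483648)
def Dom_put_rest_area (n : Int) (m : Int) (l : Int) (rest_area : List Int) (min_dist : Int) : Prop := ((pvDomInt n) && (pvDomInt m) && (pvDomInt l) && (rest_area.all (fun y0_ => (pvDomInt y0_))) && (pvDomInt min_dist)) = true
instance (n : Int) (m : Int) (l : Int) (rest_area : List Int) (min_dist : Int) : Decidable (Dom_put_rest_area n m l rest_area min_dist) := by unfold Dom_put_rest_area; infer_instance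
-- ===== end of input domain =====

-- B replaces A's unit-step while loops with one floor division per gap (asymptotically faster; return values only, no mutation involved).

-- ===== PORT A =====
-- fuel-based transcription of "while area > prev + min_dist: prev += min_dist; put_cnt += 1";
-- fuel (area - prev).toNat is enough for every terminating run (min_dist > 0 ⇒ each step raises prev by ≥ 1)
def pvAWhileGt (min_dist area : Int) : Nat → Int × Int → Int × Int
  | 0, st => st
  | fuel + 1, (prev, cnt) =>
    if area > prev + min_dist then pvAWhileGt min_dist area fuel (prev + min_dist, cnt + 1)
    else (prev, cnt)

-- fuel-based transcription of "while l - 1 >= prev + min_dist: prev += min_dist; put_cnt += 1"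
def pvAWhileGe (min_dist l : Int) : Nat → Int × Int → Int × Int
  | 0, st => st
  | fuel + 1, (prev, cnt) =>
    if l - 1 ≥ prev + min_dist then pvAWhileGe min_dist l fuel (prev + min_dist, cnt + 1)
    else (prev, cnt)

def put_rest_area (n : Int) (m : Int) (l : Int) (rest_area : List Int) (min_dist : Int) : Bool :=
  let st := rest_area.foldl (fun (st : Int × Int) area =>
      let st' := pvAWhileGt min_dist area (area - st.1).toNat st
      (area, st'.2)) (0, 0)
  let st2 := pvAWhileGe min_dist l (l - 1 - st.1).toNat st
  st2.2 ≤ m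

-- ===== PORT B =====
def put_rest_area_alt (n : Int) (m : Int) (l : Int) (rest_area : List Int) (min_dist : Int) : Bool :=
  let st := rest_area.foldl (fun (st : Int × Int) area =>
      (area, if area > st.1 then st.2 + PySem.Int.floordiv (area - st.1 - 1) min_dist else st.2)) (0, 0)
  let cnt := if l - 1 ≥ st.1 then st.2 + PySem.Int.floordiv (l - 1 - st.1) min_dist else st.2
  cnt ≤ m

-- ===== PRECONDITION & SPEC =====
-- Pre_ excludes min_dist ≤ 0, on which A's stepping loops diverge for all but degenerate inputs
-- (where they never execute and both programs return the same value anyway).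
def Pre_put_rest_area (n : Int) (m : Int) (l : Int) (rest_area : List Int) (min_dist : Int) : Prop := 0 < min_dist
instance (n : Int) (m : Int) (l : Int) (rest_area : List Int) (min_dist : Int) : Decidable (Pre_put_rest_area n m l rest_area min_dist) := by unfold Pre_put_rest_area; infer_instance
def pvWitness_put_rest_area : Int × Int × Int × List Int × Int := (4, 1, 10, [3, 7], 3)

def Spec_put_rest_area (n : Int) (m : Int) (l : Int) (rest_area : List Int) (min_dist : Int) (out : Bool) : Prop := out = put_rest_area_alt n m l rest_area min_dist
instance (n : Int) (m : Int) (l : Int) (rest_area : List Int) (min_dist : Int) (out : Bool) : Decidable (Spec_put_rest_area n m l rest_area min_dist out) := by unfold Spec_put_rest_area; infer_instance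

-- ===== CLAIM =====
def Claim_equal_put_rest_area : Prop := ∀ (n : Int) (m : Int) (l : Int) (rest_area : List Int) (min_dist : Int), Dom_put_rest_area n m l rest_area min_dist → Pre_put_rest_area n m l rest_area min_dist → Spec_put_rest_area n m l rest_area min_dist (put_rest_area n m l rest_area min_dist)

-- ===== LEMMAS AND PROOFS =====

lemma pvAWhileGt_count (min_dist area : Int) (hd : 0 < min_dist) :
    ∀ (fuel : Nat) (prev cnt : Int), (area - prev).toNat ≤ fuel →
      (pvAWhileGt min_dist area fuel (prev, cnt)).2 =
        cnt + (if area > prev then PySem.Int.floordiv (area - prev - 1) min_dist else 0) := by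
  intro fuel
  induction fuel with
  | zero =>
    intro prev cnt h
    have hle : area ≤ prev := by omega
    simp [pvAWhileGt]
    omega
  | succ k ih =>
    intro prev cnt h
    by_cases hc : area > prev + min_dist
    · have hrec := ih (prev + min_dist) (cnt + 1) (by omega)
      simp only [pvAWhileGt, if_pos hc]
      rw [hrec]
      have h1 : area > prev := by omega
      have h2 : area > prev + min_dist := hc
      rw [if_pos h1, if_pos h2]
      rw [PySem.Int.floordiv_eq_ediv_of_pos hd, PySem.Int.floordiv_eq_ediv_of_pos hd]
      have key : (area - prev - 1) = (area - (prev + min_dist) - 1) + 1 * min_dist := by ring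
      rw [key, Int.add_mul_ediv_right _ _ (by omega : min_dist ≠ 0)]
      ring
    · simp only [pvAWhileGt, if_neg hc]
      by_cases h1 : area > prev
      · rw [if_pos h1]
        have : PySem.Int.floordiv (area - prev - 1) min_dist = 0 := by
          rw [PySem.Int.floordiv_eq_ediv_of_pos hd]
          exact Int.ediv_eq_zero_of_lt (by omega) (by omega)
        omega
      · rw [if_neg h1]; omega

lemma pvAWhileGe_count (min_dist l : Int) (hd : 0 < min_dist) :
    ∀ (fuel : Nat) (prev cnt : Int), (l - 1 - prev).toNat ≤ fuel →
      (pvAWhileGe min_dist l fuel (prev, cnt)).2 =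
        cnt + (if l - 1 ≥ prev then PySem.Int.floordiv (l - 1 - prev) min_dist else 0) := by
  intro fuel
  induction fuel with
  | zero =>
    intro prev cnt h
    have hle : l - 1 ≤ prev := by omega
    by_cases h1 : l - 1 ≥ prev
    · have : prev = l - 1 := by omega
      subst this
      simp [pvAWhileGe, PySem.Int.floordiv_eq_ediv_of_pos hd]
    · simp only [pvAWhileGe, if_neg h1]
      omega
  | succ k ih =>
    intro prev cnt h
    by_cases hc : l - 1 ≥ prev + min_dist
    · have hrec := ih (prev + min_dist) (cnt + 1) (by omega)
      simp only [pvAWhileGe, if_pos hc]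
      rw [hrec]
      have h1 : l - 1 ≥ prev := by omega
      rw [if_pos hc, if_pos h1]
      rw [PySem.Int.floordiv_eq_ediv_of_pos hd, PySem.Int.floordiv_eq_ediv_of_pos hd]
      have key : (l - 1 - prev) = (l - 1 - (prev + min_dist)) + 1 * min_dist := by ring
      rw [key, Int.add_mul_ediv_right _ _ (by omega : min_dist ≠ 0)]
      ring
    · simp only [pvAWhileGe, if_neg hc]
      by_cases h1 : l - 1 ≥ prev
      · rw [if_pos h1]
        have : PySem.Int.floordiv (l - 1 - prev) min_dist = 0 := by
          rw [PySem.Int.floordiv_eq_ediv_of_pos hd]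
          exact Int.ediv_eq_zero_of_lt (by omega) (by omega)
        omega
      · rw [if_neg h1]; omega

lemma pvFold_eq (min_dist : Int) (hd : 0 < min_dist) (rest_area : List Int) :
    ∀ (prev cnt : Int),
      rest_area.foldl (fun (st : Int × Int) area =>
          let st' := pvAWhileGt min_dist area (area - st.1).toNat st
          (area, st'.2)) (prev, cnt)
      = rest_area.foldl (fun (st : Int × Int) area =>
          (area, if area > st.1 then st.2 + PySem.Int.floordiv (area - st.1 - 1) min_dist else st.2)) (prev, cnt) := by
  induction rest_area with
  | nil => intro prev cnt; rfl
  | cons a tl ih =>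
    intro prev cnt
    simp only [List.foldl_cons]
    rw [pvAWhileGt_count min_dist a hd _ prev cnt le_rfl]
    by_cases h1 : a > prev
    · rw [if_pos h1, if_pos h1, ih]
    · rw [if_neg h1, if_neg h1, add_zero, ih]

-- ===== VERDICT =====
theorem put_rest_area_spec : Claim_equal_put_rest_area := by
  intro n m l rest_area min_dist _ hpre
  unfold Spec_put_rest_area put_rest_area put_rest_area_alt
  have hd : 0 < min_dist := hpre
  rw [pvFold_eq min_dist hd rest_area 0 0]
  set st := rest_area.foldl (fun (st : Int × Int) area =>
      (area, if area > st.1 then st.2 + PySem.Int.floordiv (area - st.1 - 1) min_dist else st.2)) (0, 0) with hst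
  simp only
  rw [pvAWhileGe_count min_dist l hd _ st.1 st.2 le_rfl]
  by_cases h1 : l - 1 ≥ st.1
  · rw [if_pos h1, if_pos h1]
  · rw [if_neg h1, if_neg h1, add_zero]
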